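-- pv_equiv track=rewrite | github.com/SystemCorps/CNN-2D-X-Ray-Catheter-Detection | utils_dh/utils.py | inputAlignDirs
-- ===== SOURCE A (Python) =====
-- def inputAlignDirs(dirs):
--     aligned = []
--
--     for i in range(len(dirs)):
--         seq = [None] * 4
--         for j in range(len(seq)):
--             if i - j >= 0:
--                 seq[j] = dirs[i-j]
--         aligned.append(seq)
--     return aligned
-- ===== SOURCE B (Python) =====
-- def inputAlignDirs(dirs):
--     aligned = []
--     window = [None] * 4
--     for d in dirs:
--         window = [d] + window[:3]
--         aligned.append(window)
--     return aligned
-- ===== Notes on version B (the rewrite author's own statement) =====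
-- stated objective: simpler
-- what changed: Maintains one running 4-element window updated per element in a single pass, instead of rebuilding each window with an inner index loop and bounds-checked backwards indexing.
import Mathlib
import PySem

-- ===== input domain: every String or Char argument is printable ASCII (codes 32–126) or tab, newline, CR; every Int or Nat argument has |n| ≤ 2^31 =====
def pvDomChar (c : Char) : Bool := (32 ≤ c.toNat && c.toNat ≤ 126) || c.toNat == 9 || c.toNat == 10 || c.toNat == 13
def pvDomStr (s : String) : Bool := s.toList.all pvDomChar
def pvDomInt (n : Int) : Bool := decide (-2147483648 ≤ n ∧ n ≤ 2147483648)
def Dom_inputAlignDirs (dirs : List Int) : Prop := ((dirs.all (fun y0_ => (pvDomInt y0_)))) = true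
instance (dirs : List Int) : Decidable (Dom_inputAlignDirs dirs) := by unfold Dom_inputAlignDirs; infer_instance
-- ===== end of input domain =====

-- B replaces A's per-index inner loop (rebuilding each 4-window by bounds-checked indexing)
-- with one running window updated per element in a single pass; objective: simpler.

-- ===== PORT A =====
-- dirs[i-j] is read only when 0 ≤ i-j < len dirs, so pyGet? returns `some`,
-- matching the Option Int slot of seq exactly.
def inputAlignDirs (dirs : List Int) : List (List (Option Int)) :=
  (PySem.List.pyRange 0 dirs.length 1).foldl (fun aligned i =>
    let seq0 : List (Option Int) := PySem.List.pyRepeat [none] 4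
    let seq := (PySem.List.pyRange 0 seq0.length 1).foldl (fun seq j =>
      if i - j ≥ 0 then PySem.List.pySetD seq j (PySem.List.pyGet? dirs (i - j)) else seq) seq0
    aligned ++ [seq]) []

-- ===== PORT B =====
def inputAlignDirs_alt (dirs : List Int) : List (List (Option Int)) :=
  (dirs.foldl
    (fun (st : List (List (Option Int)) × List (Option Int)) d =>
      let window := some d :: st.2.take 3
      (st.1 ++ [window], window))
    ([], [none, none, none, none])).1

-- ===== PRECONDITION & SPEC =====
def Spec_inputAlignDirs (dirs : List Int) (out : List (List (Option Int))) : Prop := out = inputAlignDirs_alt dirs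
instance (dirs : List Int) (out : List (List (Option Int))) : Decidable (Spec_inputAlignDirs dirs out) := by unfold Spec_inputAlignDirs; infer_instance

-- ===== CLAIM (what is proved, stated in full; the proofs are below) =====
def Claim_equal_inputAlignDirs : Prop := ∀ (dirs : List Int), Dom_inputAlignDirs dirs → Spec_inputAlignDirs dirs (inputAlignDirs dirs)

-- ===== LEMMAS AND PROOFS =====

/-- The window A builds at index `i`: dirs[i-j] when in range, else None. -/
def pvSeq (l : List Int) (i : Int) : List (Option Int) :=
  [if i ≥ 0 then PySem.List.pyGet? l i else none,
   if i - 1 ≥ 0 then PySem.List.pyGet? l (i - 1) else none,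
   if i - 2 ≥ 0 then PySem.List.pyGet? l (i - 2) else none,
   if i - 3 ≥ 0 then PySem.List.pyGet? l (i - 3) else none]

theorem pyGet?_append_left (l l' : List Int) (i : Int) (h0 : 0 ≤ i) (h : i < l.length) :
    PySem.List.pyGet? (l ++ l') i = PySem.List.pyGet? l i := by
  rw [PySem.List.pyGet?_of_nonneg _ h0, PySem.List.pyGet?_of_nonneg _ h0]
  exact List.getElem?_append_left (by omega)

theorem pvSeq_append (ds : List Int) (d : Int) (i : Int) (h : i < ds.length) :
    pvSeq (ds ++ [d]) i = pvSeq ds i := by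
  simp only [pvSeq, List.cons.injEq, and_true]
  refine ⟨?_, ?_, ?_, ?_⟩ <;>
    · split_ifs with hc
      · exact pyGet?_append_left ds [d] _ hc (by omega)
      · rfl

theorem pvSeq_last (ds : List Int) (d : Int) :
    pvSeq (ds ++ [d]) (ds.length : Int) =
      some d :: (pvSeq ds ((ds.length : Int) - 1)).take 3 := by
  simp only [pvSeq, List.take_succ_cons, List.take_zero, List.cons.injEq, and_true]
  refine ⟨?_, ?_, ?_, ?_⟩
  · rw [if_pos (by omega : ((ds.length : Int)) ≥ 0)]
    exact PySem.List.pyGet?_append_length ds [] d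
  · split_ifs with hc
    · exact pyGet?_append_left ds [d] _ hc (by omega)
    · rfl
  · by_cases hc : ((ds.length : Int)) - 2 ≥ 0
    · rw [if_pos hc, if_pos (by omega : ((ds.length : Int)) - 1 - 1 ≥ 0),
        pyGet?_append_left ds [d] _ (by omega) (by omega)]
      congr 1; ring
    · rw [if_neg hc, if_neg (by omega : ¬ ((ds.length : Int)) - 1 - 1 ≥ 0)]
  · by_cases hc : ((ds.length : Int)) - 3 ≥ 0
    · rw [if_pos hc, if_pos (by omega : ((ds.length : Int)) - 1 - 2 ≥ 0),
        pyGet?_append_left ds [d] _ (by omega) (by omega)]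
      congr 1; ring
    · rw [if_neg hc, if_neg (by omega : ¬ ((ds.length : Int)) - 1 - 2 ≥ 0)]

theorem inner_eq (dirs : List Int) (k : Nat) :
    (PySem.List.pyRange 0 ((PySem.List.pyRepeat ([none] : List (Option Int)) 4).length : Int) 1).foldl
      (fun seq j => if (k : Int) - j ≥ 0 then PySem.List.pySetD seq j (PySem.List.pyGet? dirs ((k : Int) - j)) else seq)
      (PySem.List.pyRepeat ([none] : List (Option Int)) 4)
    = pvSeq dirs (k : Int) := by
  have hr : PySem.List.pyRange 0 ((PySem.List.pyRepeat ([none] : List (Option Int)) 4).length : Int) 1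
      = [0, 1, 2, 3] := by decide
  have hrep : PySem.List.pyRepeat ([none] : List (Option Int)) 4 = [none, none, none, none] := by decide
  rw [hr, hrep]
  simp only [List.foldl_cons, List.foldl_nil, pvSeq]
  split_ifs <;> simp_all [PySem.List.pySetD_of_nonneg, List.set]

theorem A_eq_map (dirs : List Int) :
    inputAlignDirs dirs = (List.range dirs.length).map (fun k : Nat => pvSeq dirs (k : Int)) := by
  unfold inputAlignDirs
  rw [PySem.List.foldl_append_singleton_eq_map, List.nil_append,
    PySem.List.pyRange_one 0 (dirs.length : Int), List.map_map]
  simp only [Int.sub_zero, Int.toNat_natCast]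
  refine List.map_congr_left ?_
  intro k hk
  simp only [Function.comp_apply, zero_add]
  exact inner_eq dirs k

theorem B_state (dirs : List Int) :
    dirs.foldl
      (fun (st : List (List (Option Int)) × List (Option Int)) d =>
        let window := some d :: st.2.take 3
        (st.1 ++ [window], window))
      ([], [none, none, none, none])
    = ((List.range dirs.length).map (fun k : Nat => pvSeq dirs (k : Int)),
       pvSeq dirs ((dirs.length : Int) - 1)) := by
  induction dirs using List.reverseRecOn with
  | nil => simp [pvSeq]
  | append_singleton ds d ih =>
      rw [List.foldl_append, ih]
      simp only [List.foldl_cons, List.foldl_nil, List.length_append, List.length_singleton]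
      rw [← pvSeq_last ds d]
      simp only [Prod.mk.injEq]
      constructor
      · rw [List.range_succ, List.map_append, List.map_singleton]
        congr 1
        refine List.map_congr_left ?_
        intro k hk
        rw [pvSeq_append ds d _ (by exact_mod_cast List.mem_range.mp hk)]
      · congr 1
        push_cast
        ring

-- ===== VERDICT (by name: the statement is the Claim_ definition above) =====
theorem inputAlignDirs_spec : Claim_equal_inputAlignDirs := by
  intro dirs _
  unfold Spec_inputAlignDirs inputAlignDirs_alt
  rw [B_state, A_eq_map]
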